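-- pv_equiv track=rewrite | github.com/msznajder/zed_shaw_learn_python_the_hard_way | codewars/find_corresponding_bracket.py | find_corresponding_opening_bracket_idx
-- ===== SOURCE A (Python) =====
-- def find_corresponding_opening_bracket_idx(s):
--
-- 	did_find_other_closing_counter = 0
-- 	for idx, ch in enumerate(s[::-1]):
-- 		if ch == ']':
-- 			did_find_other_closing_counter += 1
-- 		elif ch == '[' and did_find_other_closing_counter != 0:
-- 			did_find_other_closing_counter -= 1
-- 		elif ch == '[' and did_find_other_closing_counter == 0:
-- 			return (len(s) - 1) - idx
-- ===== SOURCE B (Python) =====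
-- def find_corresponding_opening_bracket_idx(s):
--     stack = []
--     for i, ch in enumerate(s):
--         if ch == '[':
--             stack.append(i)
--         elif ch == ']':
--             if stack:
--                 stack.pop()
--     return stack[-1] if stack else None
-- ===== Notes on version B (the rewrite author's own statement) =====
-- stated objective: idiomatic
-- what changed: A scans the string in reverse with a counter of pending closing brackets and back-translates the index; B scans forward once keeping a stack of indices of unmatched opening brackets and returns the last one (or None).
import Mathlib
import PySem

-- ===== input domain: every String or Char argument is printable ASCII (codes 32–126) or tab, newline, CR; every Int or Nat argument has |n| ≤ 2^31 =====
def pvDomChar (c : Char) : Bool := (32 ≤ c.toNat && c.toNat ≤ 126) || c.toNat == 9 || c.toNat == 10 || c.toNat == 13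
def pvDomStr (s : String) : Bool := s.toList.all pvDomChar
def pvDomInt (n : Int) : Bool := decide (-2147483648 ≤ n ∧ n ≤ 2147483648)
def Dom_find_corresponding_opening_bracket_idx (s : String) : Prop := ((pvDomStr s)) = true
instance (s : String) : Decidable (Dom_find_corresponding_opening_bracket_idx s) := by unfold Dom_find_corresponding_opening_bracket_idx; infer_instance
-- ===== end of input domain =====

-- B replaces A's reversed scan with a closing-bracket counter by a forward scan keeping a stack of
-- indices of unmatched opening brackets (returning the last one); same O(n) cost, more idiomatic.

-- ===== PORT A =====
-- A's loop over enumerate(s[::-1]) with counter `did_find_other_closing_counter`;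
-- s[::-1] is ported exactly as s.toList.reverse, len(s) as the list length.
def pvAGo (l : List Char) (idx : Int) (k : Int) (n : Int) : Option Int :=
  match l with
  | [] => none
  | c :: rest =>
    if c = ']' then pvAGo rest (idx + 1) (k + 1) n
    else if c = '[' then
      (if k ≠ 0 then pvAGo rest (idx + 1) (k - 1) n
       else some ((n - 1) - idx))
    else pvAGo rest (idx + 1) k n

def find_corresponding_opening_bracket_idx (s : String) : Option Int :=
  pvAGo s.toList.reverse 0 0 (s.toList.length : Int)

-- ===== PORT B =====
-- Source B's forward loop; the stack is kept with the most recently pushed index at the HEAD,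
-- so Python's stack[-1] (the last append) is `head?` here.
def pvBGo (l : List Char) (i : Int) (st : List Int) : List Int :=
  match l with
  | [] => st
  | c :: rest =>
    if c = '[' then pvBGo rest (i + 1) (i :: st)
    else if c = ']' then pvBGo rest (i + 1) (if st.isEmpty then st else st.tail)
    else pvBGo rest (i + 1) st

def find_corresponding_opening_bracket_idx_alt (s : String) : Option Int :=
  (pvBGo s.toList 0 []).head?

-- ===== PRECONDITION & SPEC =====
def Spec_find_corresponding_opening_bracket_idx (s : String) (out : Option Int) : Prop := out = find_corresponding_opening_bracket_idx_alt s
instance (s : String) (out : Option Int) : Decidable (Spec_find_corresponding_opening_bracket_idx s out) := by unfold Spec_find_corresponding_opening_bracket_idx; infer_instance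

-- ===== CLAIM (what is proved, stated in full; the proofs are below) =====
def Claim_equal_find_corresponding_opening_bracket_idx : Prop := ∀ (s : String), Dom_find_corresponding_opening_bracket_idx s → Spec_find_corresponding_opening_bracket_idx s (find_corresponding_opening_bracket_idx s)

-- ===== LEMMAS AND PROOFS =====

theorem pvBGo_append (xs ys : List Char) (i : Int) (st : List Int) :
    pvBGo (xs ++ ys) i st = pvBGo ys (i + (xs.length : Int)) (pvBGo xs i st) := by
  induction xs generalizing i st with
  | nil => simp [pvBGo]
  | cons c rest ih =>
    simp only [List.cons_append, pvBGo, List.length_cons]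
    split_ifs <;> rw [ih] <;> (congr 1; push_cast; ring)

-- the invariant: A's reverse scan with counter k reads off the k-th element of B's stack
theorem pvAGo_eq_getElem (cs : List Char) (k : Nat) (n : Int) :
    pvAGo cs.reverse (n - (cs.length : Int)) (k : Int) n = (pvBGo cs 0 [])[k]? := by
  induction cs using List.reverseRecOn generalizing k with
  | nil => simp [pvAGo, pvBGo]
  | append_singleton ds c ih =>
    have hlen : ((ds ++ [c]).length : Int) = (ds.length : Int) + 1 := by simp
    rw [List.reverse_append, pvBGo_append, hlen]
    simp only [List.reverse_singleton, List.singleton_append, pvAGo, pvBGo, zero_add]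
    by_cases hc1 : c = ']'
    · simp only [hc1]
      have : n - ((ds.length : Int) + 1) + 1 = n - (ds.length : Int) := by ring
      rw [this]
      have hk : ((k : Int) + 1) = ((k + 1 : Nat) : Int) := by push_cast; ring
      rw [hk, ih (k + 1)]
      rcases h : pvBGo ds 0 [] with _ | ⟨a, t⟩ <;> simp
    · simp only [if_neg hc1]
      by_cases hc2 : c = '['
      · simp only [hc2]
        cases k with
        | zero =>
          simp only [Nat.cast_zero, ne_eq, not_true_eq_false, if_false]
          have : n - 1 - (n - ((ds.length : Int) + 1)) = (ds.length : Int) := by ring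
          simp [this]
        | succ m =>
          have hk0 : ((m + 1 : Nat) : Int) ≠ 0 := by positivity
          simp only [hk0, if_pos, ne_eq, not_false_eq_true]
          have : n - ((ds.length : Int) + 1) + 1 = n - (ds.length : Int) := by ring
          rw [this]
          have hk : ((m + 1 : Nat) : Int) - 1 = (m : Int) := by push_cast; ring
          rw [hk, ih m]
          simp
      · simp only [if_neg hc2]
        have : n - ((ds.length : Int) + 1) + 1 = n - (ds.length : Int) := by ring
        rw [this, ih k]

-- ===== VERDICT (by name: the statement is the Claim_ definition above) =====
theorem find_corresponding_opening_bracket_idx_spec : Claim_equal_find_corresponding_opening_bracket_idx := by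
  intro s _
  unfold Spec_find_corresponding_opening_bracket_idx
  unfold find_corresponding_opening_bracket_idx find_corresponding_opening_bracket_idx_alt
  have h := pvAGo_eq_getElem s.toList 0 (s.toList.length : Int)
  simp only [Nat.cast_zero, sub_self] at h
  rw [h, List.head?_eq_getElem?]
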